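-- pv_equiv track=rewrite | github.com/szym47/pp1 | 04-Subroutines/floawacronym.py | f
-- ===== SOURCE A (Python) =====
-- def f(name):
--     words = name.split()
--     i = 0
--     acronym = ""
--     while i < len(words):
--         acronym += words[i][0]
--         i += 1
--     return acronym
-- ===== SOURCE B (Python) =====
-- def f(name):
--     acronym = ""
--     at_word_start = True
--     for c in name:
--         if c.isspace():
--             at_word_start = True
--         elif at_word_start:
--             acronym += c
--             at_word_start = False
--     return acronym
-- ===== Notes on version B (the rewrite author's own statement) =====
-- stated objective: simpler
-- what changed: B detects word starts in a single character scan with a boolean flag instead of building a words list with split() and indexing each word.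
import Mathlib
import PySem

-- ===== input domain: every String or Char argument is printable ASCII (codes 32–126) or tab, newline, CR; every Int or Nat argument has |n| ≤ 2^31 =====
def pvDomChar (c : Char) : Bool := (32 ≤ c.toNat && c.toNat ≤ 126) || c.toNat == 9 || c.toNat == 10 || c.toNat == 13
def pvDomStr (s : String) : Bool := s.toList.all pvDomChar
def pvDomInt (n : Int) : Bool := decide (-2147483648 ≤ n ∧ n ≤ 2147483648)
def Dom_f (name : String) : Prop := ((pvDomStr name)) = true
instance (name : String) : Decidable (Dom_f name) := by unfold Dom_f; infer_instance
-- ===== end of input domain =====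

-- B replaces A's split()-then-index-each-word loop by a single character scan with a
-- word-start flag (same task, different decomposition; no speed claim).

-- ===== PORT A =====
-- words = name.split(); while i < len(words): acronym += words[i][0]
-- (split() yields only nonempty words, so words[i][0] never raises; the [] default is unreachable)
def f (name : String) : String :=
  let words := PySem.Chars.split₀ name.toList
  String.ofList (words.foldl
    (fun acronym w => acronym ++ ((PySem.List.pyGet? w 0).elim [] (fun c => [c]))) [])

-- ===== PORT B =====
-- single scan: a whitespace char arms the flag; a non-space char with the flag armed is appended
def f_alt (name : String) : String :=
  String.ofList ((name.toList.foldl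
    (fun (st : Bool × List Char) c =>
      if PySem.Chars.isspace c then (true, st.2)
      else if st.1 then (false, st.2 ++ [c]) else (false, st.2))
    (true, [])).2)

-- ===== PRECONDITION & SPEC =====
def Spec_f (name : String) (out : String) : Prop := out = f_alt name
instance (name : String) (out : String) : Decidable (Spec_f name out) := by unfold Spec_f; infer_instance

-- ===== CLAIM (what is proved, stated in full; the proofs are below) =====
def Claim_equal_f : Prop := ∀ (name : String), Dom_f name → Spec_f name (f name)

-- ===== LEMMAS AND PROOFS =====

-- first character of a word, as A's loop body extracts it
def pvHd (w : List Char) : List Char := (PySem.List.pyGet? w 0).elim [] (fun c => [c])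

@[simp] lemma pvHd_nil : pvHd [] = [] := by simp [pvHd, PySem.List.pyGet?, PySem.List.pyIdx?]

@[simp] lemma pvHd_cons (c : Char) (t : List Char) : pvHd (c :: t) = [c] := by
  simp [pvHd, PySem.List.pyGet?, PySem.List.pyIdx?]

lemma pvHd_append_singleton (xs : List Char) (c : Char) (h : xs ≠ []) :
    pvHd (xs ++ [c]) = pvHd xs := by
  cases xs with
  | nil => exact absurd rfl h
  | cons d t => simp

-- the list of first letters, as B's scan produces it (b = word-start flag)
def pvH : List Char → Bool → List Char
  | [], _ => []
  | c :: cs, b =>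
      if PySem.Chars.isspace c then pvH cs true
      else (if b then [c] else []) ++ pvH cs false

-- A's foldl is an append-fold: it concatenates the heads
lemma foldl_hd_eq (ws : List (List Char)) (acc : List Char) :
    ws.foldl (fun a w => a ++ pvHd w) acc = acc ++ ws.flatMap pvHd := by
  induction ws generalizing acc with
  | nil => simp
  | cons w t ih => simp [List.foldl, ih, List.append_assoc]

-- the heads of split₀.go's output, with general loop state
lemma split_go_hd (cs : List Char) (cur : List Char) (acc : List (List Char)) :
    (PySem.Chars.split₀.go cs cur acc).flatMap pvHd =
      acc.reverse.flatMap pvHd ++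
        (if cur.isEmpty then pvH cs true else pvHd cur.reverse ++ pvH cs false) := by
  induction cs generalizing cur acc with
  | nil =>
    rw [PySem.Chars.split₀.go.eq_def]
    cases cur with
    | nil => simp [pvH]
    | cons d t => simp [pvH]
  | cons c rest ih =>
    rw [PySem.Chars.split₀.go.eq_def]
    by_cases hs : PySem.Chars.isspace c = true
    · cases cur with
      | nil => simp [hs, ih, pvH]
      | cons d t => simp [hs, ih, pvH, List.append_assoc]
    · cases cur with
      | nil => simp [hs, ih, pvH]
      | cons d t =>
        have hne : (d :: t).reverse ≠ [] := by simp
        simp [hs, ih, pvH, List.append_assoc]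
        rw [show t.reverse ++ [d, c] = (t.reverse ++ [d]) ++ [c] by simp,
          pvHd_append_singleton _ c (by simp)]

-- B's scan, with general accumulator and flag
lemma scan_eq (cs : List Char) (b : Bool) (acc : List Char) :
    (cs.foldl
      (fun (st : Bool × List Char) c =>
        if PySem.Chars.isspace c then (true, st.2)
        else if st.1 then (false, st.2 ++ [c]) else (false, st.2))
      (b, acc)).2 = acc ++ pvH cs b := by
  induction cs generalizing b acc with
  | nil => simp [pvH]
  | cons c rest ih =>
    by_cases hs : PySem.Chars.isspace c = true
    · simp [List.foldl, hs, ih, pvH]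
    · cases b <;> simp [List.foldl, hs, ih, pvH, List.append_assoc]

-- ===== VERDICT (by name: the statement is the Claim_ definition above) =====
theorem f_spec : Claim_equal_f := by
  intro name _
  show f name = f_alt name
  unfold f f_alt
  dsimp only
  have hA := foldl_hd_eq (PySem.Chars.split₀ name.toList) []
  have hGo := split_go_hd name.toList [] []
  have hB := scan_eq name.toList true []
  simp only [pvHd] at hA
  rw [hA, hB]
  simp only [List.nil_append]
  rw [show PySem.Chars.split₀ name.toList = PySem.Chars.split₀.go name.toList [] [] from rfl,
    hGo]
  simp
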